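-- pv_equiv track=rewrite | github.com/cmry/markdoc | markdoc.py | md_code_text
-- ===== SOURCE A (Python) =====
-- MD_CODE = '``` python \n {0} \n```\n\n'
--
-- def md_code_text(doc, name, flat=False):
--     """Section text and/or code in the example part of the doc.
--
--     If some code related beginnings (>>>, ...) is founds buffer to code,
--     else we regard it as text. Record order so that multiple consecutive
--     blocks of text and code are possible.
--
--     Parameters
--     ----------
--     doc : str
--         Flat string structure of a docstring block.
--     name : str
--         Name of the section (Examples, Notes).
--     flat : bool, optional, default False
--         If there are no code blocks, flat can be used to stop parsing them.
--
--     Returns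
--     -------
--     code : str
--         Formatted block of fenced markdown code-snippets and flat text.
--
--     Notes
--     -----
--     Please note that this method assumes markdown is uses so-called
--     fenced codeblocks that are commonly accepted by Readthedocs, GitHub,
--     Bitbucket, and Jekyll (for example with Redcarpet).
--
--     This current implementation does NOT allow for IPython styled code
--     examples. (In [1]: Out[1]: etc.)
--     """
--     head = '\n\n------- \n\n##{1}\n\n{0}'
--     order, text, code = [], '', ''
--
--     if not doc:
--         return ''
--
--     # if code marker, store to code, else store to text
--     for row in doc:
--         if not flat and ('>>>' in row or '...' in row):
--             if text:
--                 order.append(text)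
--                 text = ''
--             row = row.replace('    >>>', '>>>')
--             row = row.replace('    ...', '...')
--             code += row + '\n'
--         else:
--             if code:
--                 # if we found code, encapsulate in ``` python ``` blocks.
--                 order.append(MD_CODE.format(code))
--                 code = ''
--             row = row.replace('  ', '')
--             text += row + '\n' + ('\n' if any([row.endswith(x) for x
--                                   in ('!', '?', '.', ':')]) else '')
--
--     if text:  # empty the buffer
--         order.append(text.replace('\\', ''))
--     if code:
--         order.append(MD_CODE.format(code))
--
--     return head.format('\n'.join(order).replace('.\n', '.\n\n'), name)
-- ===== SOURCE B (Python) =====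
-- MD_CODE = '``` python \n {0} \n```\n\n'
--
--
-- def md_code_text(doc, name, flat=False):
--     """Run-based reformulation: split doc into maximal runs of code/text rows,
--     format each run independently, stripping backslashes only from a trailing
--     text run."""
--     if not doc:
--         return ''
--
--     def is_code(row):
--         return (not flat) and ('>>>' in row or '...' in row)
--
--     def split_runs(rows):
--         if not rows:
--             return []
--         k = is_code(rows[0])
--         i = 0
--         while i < len(rows) and is_code(rows[i]) == k:
--             i += 1
--         return [(k, rows[:i])] + split_runs(rows[i:])
--
--     def fmt_code(rows):
--         return MD_CODE.format(''.join(
--             r.replace('    >>>', '>>>').replace('    ...', '...') + '\n'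
--             for r in rows))
--
--     def piece(row):
--         r = row.replace('  ', '')
--         return r + '\n' + ('\n' if r.endswith(('!', '?', '.', ':')) else '')
--
--     def fmt_runs(runs):
--         if not runs:
--             return []
--         (k, rows), rest = runs[0], runs[1:]
--         if k:
--             return [fmt_code(rows)] + fmt_runs(rest)
--         t = ''.join(piece(r) for r in rows)
--         if not rest:
--             return [t.replace('\\', '')]
--         return [t] + fmt_runs(rest)
--
--     body = '\n'.join(fmt_runs(split_runs(doc))).replace('.\n', '.\n\n')
--     return '\n\n------- \n\n##{1}\n\n{0}'.format(body, name)
-- ===== Notes on version B (the rewrite author's own statement) =====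
-- stated objective: alternative
-- what changed: B replaces A's single stateful pass with mutable text/code buffers and flush-on-transition by a run-based decomposition: it splits the rows into maximal runs of code/text rows, formats each run independently with ''.join (stripping backslashes only from a trailing text run), and joins the formatted runs.
import Mathlib
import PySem

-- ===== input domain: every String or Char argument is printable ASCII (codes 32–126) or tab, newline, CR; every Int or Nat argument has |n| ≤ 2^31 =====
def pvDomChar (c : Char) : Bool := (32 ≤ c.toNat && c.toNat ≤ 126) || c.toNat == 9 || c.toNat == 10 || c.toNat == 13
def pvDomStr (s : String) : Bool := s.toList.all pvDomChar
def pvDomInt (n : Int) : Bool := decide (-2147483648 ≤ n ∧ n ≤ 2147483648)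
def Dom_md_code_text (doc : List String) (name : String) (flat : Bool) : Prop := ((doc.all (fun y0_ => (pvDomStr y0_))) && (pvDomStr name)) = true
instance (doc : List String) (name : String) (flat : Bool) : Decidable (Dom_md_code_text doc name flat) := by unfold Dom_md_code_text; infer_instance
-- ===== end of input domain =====

-- B re-implements A by splitting the rows into maximal code/text runs and formatting each
-- run independently (objective: alternative decomposition, same cost); return values agree everywhere.

-- ===== PORT A =====

-- shared row-level helpers (the per-row expressions of the Python source)
def isCodeRow (flat : Bool) (row : String) : Bool :=
  !flat && (PySem.Str.isIn ">>>" row || PySem.Str.isIn "..." row)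

def transformCode (row : String) : String :=
  PySem.Str.replace (PySem.Str.replace row "    >>>" ">>>") "    ..." "..."

def textPiece (row : String) : String :=
  let r := PySem.Str.replace row "  " ""
  r ++ "\n" ++ (if PySem.Str.endswith r "!" || PySem.Str.endswith r "?" ||
                   PySem.Str.endswith r "." || PySem.Str.endswith r ":" then "\n" else "")

-- MD_CODE.format(code)
def mdCodeFmt (code : String) : String := "``` python \n " ++ code ++ " \n```\n\n"

-- A's loop over the rows with state (order, text, code), including the final buffer flushes
def aLoop (flat : Bool) : List String → List String → String → String → List String
  | [], order, text, code =>
      let order1 := if text = "" then order else order ++ [PySem.Str.replace text "\\" ""]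
      if code = "" then order1 else order1 ++ [mdCodeFmt code]
  | r :: rest, order, text, code =>
      if isCodeRow flat r then
        let order1 := if text = "" then order else order ++ [text]
        let text1 := if text = "" then text else ""
        aLoop flat rest order1 text1 (code ++ (transformCode r ++ "\n"))
      else
        let order1 := if code = "" then order else order ++ [mdCodeFmt code]
        let code1 := if code = "" then code else ""
        aLoop flat rest order1 (text ++ textPiece r) code1

def md_code_text (doc : List String) (name : String) (flat : Bool) : String :=
  if doc = [] then ""
  else
    "\n\n------- \n\n##" ++ name ++ "\n\n" ++
      PySem.Str.replace (PySem.Str.join "\n" (aLoop flat doc [] "" "")) ".\n" ".\n\n"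

-- ===== PORT B =====

-- split_runs: maximal runs of rows of equal kind
def splitRuns (flat : Bool) : List String → List (Bool × List String)
  | [] => []
  | r :: rest =>
      let k := isCodeRow flat r
      (k, (r :: rest).takeWhile (fun x => isCodeRow flat x == k)) ::
        splitRuns flat ((r :: rest).dropWhile (fun x => isCodeRow flat x == k))
  termination_by l => l.length
  decreasing_by
    simp only [List.dropWhile_cons, beq_self_eq_true, if_pos]
    exact Nat.lt_succ_of_le (List.length_dropWhile_le _ _)

-- ''.join of the transformed code rows
def codeBody (rows : List String) : String :=
  PySem.Str.join "" (rows.map (fun r => transformCode r ++ "\n"))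

-- fmt_code
def fmtCode (rows : List String) : String := mdCodeFmt (codeBody rows)

-- ''.join of the text pieces
def textBody (rows : List String) : String :=
  PySem.Str.join "" (rows.map textPiece)

-- fmt_runs: one formatted block per run; only a TRAILING text run gets its backslashes stripped
def fmtRuns : List (Bool × List String) → List String
  | [] => []
  | (k, rows) :: rest =>
      if k then fmtCode rows :: fmtRuns rest
      else if rest = [] then [PySem.Str.replace (textBody rows) "\\" ""]
      else textBody rows :: fmtRuns rest

def md_code_text_alt (doc : List String) (name : String) (flat : Bool) : String :=
  if doc = [] then ""
  else
    "\n\n------- \n\n##" ++ name ++ "\n\n" ++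
      PySem.Str.replace (PySem.Str.join "\n" (fmtRuns (splitRuns flat doc))) ".\n" ".\n\n"

-- ===== PRECONDITION & SPEC =====
def Spec_md_code_text (doc : List String) (name : String) (flat : Bool) (out : String) : Prop := out = md_code_text_alt doc name flat
instance (doc : List String) (name : String) (flat : Bool) (out : String) : Decidable (Spec_md_code_text doc name flat out) := by unfold Spec_md_code_text; infer_instance

-- ===== CLAIM (what is proved, stated in full; the proofs are below) =====
def Claim_equal_md_code_text : Prop := ∀ (doc : List String) (name : String) (flat : Bool), Dom_md_code_text doc name flat → Spec_md_code_text doc name flat (md_code_text doc name flat)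

-- ===== LEMMAS AND PROOFS =====

theorem charsJoin_nil_cons (x : List Char) (l : List (List Char)) :
    PySem.Chars.join [] (x :: l) = x ++ PySem.Chars.join [] l := by
  induction l with
  | nil => simp [PySem.Chars.join, List.intercalate]
  | cons y t ih => simp [PySem.Chars.join, List.intercalate] at *

theorem strJoin_empty_nil : PySem.Str.join "" ([] : List String) = "" := by
  apply String.toList_inj.mp
  simp [PySem.Str.toList_join, PySem.Chars.join, List.intercalate]

theorem strJoin_empty_cons (x : String) (l : List String) :
    PySem.Str.join "" (x :: l) = x ++ PySem.Str.join "" l := by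
  apply String.toList_inj.mp
  simp [PySem.Str.toList_join, String.toList_append, charsJoin_nil_cons]

theorem ne_empty_of_toList_ne {s : String} (h : s.toList ≠ []) : s ≠ "" := by
  intro he; subst he; simp at h

theorem textPiece_ne (r : String) : textPiece r ≠ "" := by
  apply ne_empty_of_toList_ne
  simp [textPiece, String.toList_append]

theorem textBody_cons (r : String) (rs : List String) :
    textBody (r :: rs) = textPiece r ++ textBody rs := by
  simp only [textBody, List.map_cons, strJoin_empty_cons]

theorem codeBody_cons (r : String) (rs : List String) :
    codeBody (r :: rs) = (transformCode r ++ "\n") ++ codeBody rs := by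
  simp only [codeBody, List.map_cons, strJoin_empty_cons]

theorem textBody_ne (r : String) (rs : List String) : textBody (r :: rs) ≠ "" := by
  rw [textBody_cons]
  apply ne_empty_of_toList_ne
  simp only [String.toList_append]
  have := textPiece_ne r
  intro h
  rcases List.append_eq_nil_iff.mp h with ⟨h1, _⟩
  exact this (String.toList_inj.mp (by simp [h1]))

theorem codeBody_ne (r : String) (rs : List String) : codeBody (r :: rs) ≠ "" := by
  rw [codeBody_cons]
  apply ne_empty_of_toList_ne
  simp [String.toList_append]

-- A's loop across a run of code rows accumulates exactly codeBody
theorem codeAccum (flat : Bool) (rs : List String) :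
    ∀ (rest order : List String) (c : String), (∀ r ∈ rs, isCodeRow flat r = true) →
      aLoop flat (rs ++ rest) order "" c = aLoop flat rest order "" (c ++ codeBody rs) := by
  induction rs with
  | nil => intro rest order c _; simp [codeBody, strJoin_empty_nil]
  | cons r rs ih =>
    intro rest order c h
    have hr : isCodeRow flat r = true := h r (List.mem_cons_self)
    simp only [List.cons_append, aLoop, hr, if_true]
    rw [ih rest order (c ++ (transformCode r ++ "\n")) (fun x hx => h x (List.mem_cons_of_mem _ hx))]
    rw [codeBody_cons]
    simp only [String.append_assoc]

-- A's loop across a run of text rows accumulates exactly textBody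
theorem textAccum (flat : Bool) (rs : List String) :
    ∀ (rest order : List String) (t : String), (∀ r ∈ rs, isCodeRow flat r = false) →
      aLoop flat (rs ++ rest) order t "" = aLoop flat rest order (t ++ textBody rs) "" := by
  induction rs with
  | nil => intro rest order t _; simp [textBody, strJoin_empty_nil]
  | cons r rs ih =>
    intro rest order t h
    have hr : isCodeRow flat r = false := h r (List.mem_cons_self)
    simp only [List.cons_append, aLoop, hr, Bool.false_eq_true, if_false, reduceIte]
    rw [ih rest order (t ++ textPiece r) (fun x hx => h x (List.mem_cons_of_mem _ hx))]
    rw [textBody_cons]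
    simp only [String.append_assoc]

-- A flushes a non-empty code buffer exactly when the next row is text (or the input ends)
theorem codeFlush (flat : Bool) (rest order : List String) (c : String) (hc : c ≠ "")
    (hrest : rest = [] ∨ ∃ r rest', rest = r :: rest' ∧ isCodeRow flat r = false) :
    aLoop flat rest order "" c = aLoop flat rest (order ++ [mdCodeFmt c]) "" "" := by
  rcases hrest with h | ⟨r, rest', h, hr⟩
  · subst h; simp [aLoop, hc]
  · subst h; simp [aLoop, hc, hr]

theorem textFlushEnd (flat : Bool) (order : List String) (t : String) (ht : t ≠ "") :
    aLoop flat [] order t "" = order ++ [PySem.Str.replace t "\\" ""] := by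
  simp [aLoop, ht]

theorem textFlushMid (flat : Bool) (r : String) (rest order : List String) (t : String)
    (ht : t ≠ "") (hr : isCodeRow flat r = true) :
    aLoop flat (r :: rest) order t "" = aLoop flat (r :: rest) (order ++ [t]) "" "" := by
  simp [aLoop, hr, ht]

-- main invariant: A's loop from empty buffers appends exactly B's formatted runs
theorem loop_eq_runs_aux (flat : Bool) (n : Nat) : ∀ (doc : List String), doc.length ≤ n →
    ∀ (order : List String), aLoop flat doc order "" "" = order ++ fmtRuns (splitRuns flat doc) := by
  induction n with
  | zero =>
    intro doc hd order
    have hde : doc = [] := List.eq_nil_of_length_eq_zero (Nat.le_zero.mp hd)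
    subst hde
    simp [aLoop, splitRuns, fmtRuns]
  | succ n ih =>
    intro doc hd order
    match doc with
    | [] => simp [aLoop, splitRuns, fmtRuns]
    | r :: ds =>
      set k := isCodeRow flat r with hkdef
      have hsplit : splitRuns flat (r :: ds) =
          (k, (r :: ds).takeWhile (fun x => isCodeRow flat x == k)) ::
            splitRuns flat ((r :: ds).dropWhile (fun x => isCodeRow flat x == k)) := by
        rw [splitRuns]
      have hpr : (fun x => isCodeRow flat x == k) r = true := by simp [hkdef]
      have htw : (r :: ds).takeWhile (fun x => isCodeRow flat x == k) =
          r :: ds.takeWhile (fun x => isCodeRow flat x == k) := by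
        simp [hpr]
      have hdoc : r :: ds = (r :: ds).takeWhile (fun x => isCodeRow flat x == k) ++
          (r :: ds).dropWhile (fun x => isCodeRow flat x == k) :=
        (List.takeWhile_append_dropWhile).symm
      have hmem : ∀ x ∈ (r :: ds).takeWhile (fun x => isCodeRow flat x == k),
          isCodeRow flat x = k := by
        intro x hx
        have := List.mem_takeWhile_imp hx
        exact beq_iff_eq.mp this
      have hlen : ((r :: ds).dropWhile (fun x => isCodeRow flat x == k)).length < ds.length + 1 := by
        simp only [List.dropWhile_cons, hpr, if_pos]
        exact Nat.lt_succ_of_le (List.length_dropWhile_le _ _)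
      have hrest : (r :: ds).dropWhile (fun x => isCodeRow flat x == k) = [] ∨
          ∃ r' rest', (r :: ds).dropWhile (fun x => isCodeRow flat x == k) = r' :: rest' ∧
            (isCodeRow flat r' == k) = false := by
        cases hd : (r :: ds).dropWhile (fun x => isCodeRow flat x == k) with
        | nil => exact Or.inl rfl
        | cons r' rest' =>
          refine Or.inr ⟨r', rest', rfl, ?_⟩
          have := List.head?_dropWhile_not (fun x => isCodeRow flat x == k) (r :: ds)
          rw [hd] at this
          simpa using this
      cases hkv : k with
      | true =>
        have hmem' : ∀ x ∈ (r :: ds).takeWhile (fun x => isCodeRow flat x == k),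
            isCodeRow flat x = true := fun x hx => by rw [hmem x hx, hkv]
        conv_lhs => rw [hdoc]
        rw [codeAccum flat _ _ order "" hmem', String.empty_append]
        have hcne : codeBody ((r :: ds).takeWhile (fun x => isCodeRow flat x == k)) ≠ "" := by
          rw [htw]; exact codeBody_ne _ _
        rw [codeFlush flat _ order _ hcne (by
          rcases hrest with h | ⟨r', rest', h, hr'⟩
          · exact Or.inl h
          · refine Or.inr ⟨r', rest', h, ?_⟩
            have := beq_eq_false_iff_ne.mp hr'
            cases hv : isCodeRow flat r' with
            | false => rfl
            | true => exact absurd (by rw [hv, hkv]) this)]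
        rw [ih ((r :: ds).dropWhile (fun x => isCodeRow flat x == k)) (by
          simp only [List.length_cons] at hd; omega) _]
        rw [hsplit, hkv, fmtRuns, if_pos rfl]
        simp [fmtCode, List.append_assoc]
      | false =>
        have hmem' : ∀ x ∈ (r :: ds).takeWhile (fun x => isCodeRow flat x == k),
            isCodeRow flat x = false := fun x hx => by rw [hmem x hx, hkv]
        conv_lhs => rw [hdoc]
        rw [textAccum flat _ _ order "" hmem', String.empty_append]
        have htne : textBody ((r :: ds).takeWhile (fun x => isCodeRow flat x == k)) ≠ "" := by
          rw [htw]; exact textBody_ne _ _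
        rcases hrest with h | ⟨r', rest', h, hr'⟩
        · rw [h, textFlushEnd flat order _ htne, hsplit, hkv]
          rw [hkv] at h
          rw [h]
          simp [splitRuns, fmtRuns]
        · have hr'' : isCodeRow flat r' = true := by
            have := beq_eq_false_iff_ne.mp hr'
            cases hv : isCodeRow flat r' with
            | true => rfl
            | false => exact absurd (by rw [hv, hkv]) this
          rw [h, textFlushMid flat r' rest' order _ htne hr'', ← h]
          rw [ih ((r :: ds).dropWhile (fun x => isCodeRow flat x == k)) (by
            simp only [List.length_cons] at hd; omega) _]
          rw [hsplit, hkv, fmtRuns]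
          rw [hkv] at h
          have hruns : ¬ splitRuns flat ((r :: ds).dropWhile (fun x => isCodeRow flat x == false)) = [] := by
            rw [h, splitRuns]; simp
          simp only [Bool.false_eq_true, if_false]
          rw [if_neg hruns]
          simp [List.append_assoc]

theorem loop_eq_runs (flat : Bool) (doc : List String) (order : List String) :
    aLoop flat doc order "" "" = order ++ fmtRuns (splitRuns flat doc) :=
  loop_eq_runs_aux flat doc.length doc (Nat.le_refl _) order

-- ===== VERDICT (by name: the statement is the Claim_ definition above) =====
theorem md_code_text_spec : Claim_equal_md_code_text := by
  intro doc name flat _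
  unfold Spec_md_code_text md_code_text md_code_text_alt
  cases doc with
  | nil => simp
  | cons r ds =>
    rw [loop_eq_runs flat (r :: ds) []]
    simp
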